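-- pv_equiv track=rewrite | github.com/hongii/programmers_python | LV 1/숫자 짝꿍.py | solution
-- ===== SOURCE A (Python) =====
-- def solution(X, Y):
--     listX, listY = list(X), list(Y)
--     intersection = list(set(listX) & set(listY))
--     if len(intersection) == 0:
--         return "-1"
--     elif intersection == ['0']:
--         return "0"
--     else:
--         res = intersection
--         for i in range(len(intersection)):
--             cntX = listX.count(intersection[i])
--             cntY = listY.count(intersection[i])
--             if cntX != cntY or (cntX > 1 and cntY > 1):
--                 addCnt = min(cntX, cntY) -1
--                 for j in range(addCnt):
--                     res.append(intersection[i])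
--         res.sort(reverse=True)
--         return "".join(res)
-- ===== SOURCE B (Python) =====
-- def solution(X, Y):
--     # Two-pointer merge of the two descending-sorted strings: emits the
--     # multiset intersection already in descending order, no counting needed.
--     sx = sorted(X, reverse=True)
--     sy = sorted(Y, reverse=True)
--     res = []
--     i = j = 0
--     while i < len(sx) and j < len(sy):
--         if sx[i] == sy[j]:
--             res.append(sx[i])
--             i += 1
--             j += 1
--         elif sx[i] > sy[j]:
--             i += 1
--         else:
--             j += 1
--     if not res:
--         return "-1"
--     if all(c == '0' for c in res):
--         return "0"
--     return "".join(res)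
-- ===== Notes on version B (the rewrite author's own statement) =====
-- stated objective: alternative
-- what changed: A intersects the character sets and rebuilds the answer multiset via per-character count() scans plus a guarded append loop, then sorts that multiset; B sorts the two strings once and computes the multiset intersection directly with a two-pointer merge, which emits the answer already in descending order with no counting at all.
import Mathlib
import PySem

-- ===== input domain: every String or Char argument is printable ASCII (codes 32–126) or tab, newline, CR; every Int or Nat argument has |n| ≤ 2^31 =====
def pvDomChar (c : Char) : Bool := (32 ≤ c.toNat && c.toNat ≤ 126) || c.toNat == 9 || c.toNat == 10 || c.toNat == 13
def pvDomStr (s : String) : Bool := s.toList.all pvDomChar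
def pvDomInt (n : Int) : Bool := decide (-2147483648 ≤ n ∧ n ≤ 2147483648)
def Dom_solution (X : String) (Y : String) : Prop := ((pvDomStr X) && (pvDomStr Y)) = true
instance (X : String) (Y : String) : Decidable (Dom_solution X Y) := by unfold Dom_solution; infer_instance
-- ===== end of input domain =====

-- B replaces A's set-intersection + per-character count() rebuild + final sort by a
-- two-pointer merge of the two descending-sorted strings (alternative algorithm).

-- ===== PORT A =====
def solution (X : String) (Y : String) : String :=
  let listX := X.toList
  let listY := Y.toList
  let intersection := PySem.Set.inter (PySem.Set.ofList listX) (PySem.Set.ofList listY)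
  if PySem.List.len intersection = 0 then "-1"
  else if intersection = ['0'] then "0"
  else
    let res := (PySem.List.pyRange 0 (PySem.List.len intersection) 1).foldl (fun res i =>
      let c := PySem.List.pyGetD intersection i ' '
      let cntX := PySem.List.count listX c
      let cntY := PySem.List.count listY c
      if cntX ≠ cntY ∨ (cntX > 1 ∧ cntY > 1) then
        res ++ List.replicate (min cntX cntY - 1) c
      else res) intersection
    String.ofList (PySem.List.sorted res (fun x => x) true)

-- ===== PORT B =====
-- the while loop over the two index pointers, transcribed as the obvious
-- recursion on the two (descending-sorted) lists
def mergeInter : List Char → List Char → List Char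
  | [], _ => []
  | _ :: _, [] => []
  | x :: xs, y :: ys =>
    if x = y then x :: mergeInter xs ys
    else if y < x then mergeInter xs (y :: ys)
    else mergeInter (x :: xs) ys
termination_by l₁ l₂ => l₁.length + l₂.length

def solution_alt (X : String) (Y : String) : String :=
  let sx := PySem.List.sorted X.toList (fun c => c) true
  let sy := PySem.List.sorted Y.toList (fun c => c) true
  let res := mergeInter sx sy
  if res = [] then "-1"
  else if res.all (fun c => c == '0') then "0"
  else String.ofList res

-- ===== PRECONDITION & SPEC =====
def Spec_solution (X : String) (Y : String) (out : String) : Prop := out = solution_alt X Y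
instance (X : String) (Y : String) (out : String) : Decidable (Spec_solution X Y out) := by unfold Spec_solution; infer_instance

-- ===== CLAIM (what is proved, stated in full; the proofs are below) =====
def Claim_equal_solution : Prop := ∀ (X : String) (Y : String), Dom_solution X Y → Spec_solution X Y (solution X Y)

-- ===== LEMMAS AND PROOFS =====

def keyC (c : Char) : Nat := 1114111 - c.toNat

theorem charToNatLe (a : Char) : a.toNat ≤ 1114111 := by
  have h := a.valid
  show a.val.toNat ≤ 1114111
  rcases h with h | ⟨_, h⟩ <;> omega

theorem keyC_inj : Function.Injective keyC := by
  intro a b h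
  unfold keyC at h
  have ha := charToNatLe a
  have hb := charToNatLe b
  have h' : a.val.toNat = b.val.toNat := by
    show a.toNat = b.toNat
    omega
  exact Char.ext (UInt32.toNat_inj.mp h')

theorem keyC_anti (a b : Char) (h : b ≤ a) : keyC a ≤ keyC b := by
  have : b.toNat ≤ a.toNat := by
    simp only [Char.le_def, UInt32.le_iff_toNat_le] at h
    exact h
  unfold keyC; omega

-- descending lists
def Desc (l : List Char) : Prop := l.Pairwise (fun a b => b ≤ a)

theorem desc_head_ge {y : Char} {ys : List Char} (h : Desc (y :: ys)) :
    ∀ z ∈ y :: ys, z ≤ y := by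
  intro z hz
  rcases List.mem_cons.mp hz with rfl | hz
  · exact le_refl _
  · exact (List.pairwise_cons.mp h).1 z hz

theorem count_eq_zero_of_desc_lt {c y : Char} {ys : List Char}
    (h : Desc (y :: ys)) (hlt : y < c) : (y :: ys).count c = 0 := by
  refine List.count_eq_zero.mpr (fun hc => ?_)
  exact absurd (desc_head_ge h c hc) (not_le.mpr hlt)

theorem mergeInter_count (l₁ l₂ : List Char) (h₁ : Desc l₁) (h₂ : Desc l₂) (c : Char) :
    (mergeInter l₁ l₂).count c = min (l₁.count c) (l₂.count c) := by
  fun_induction mergeInter l₁ l₂ with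
  | case1 l => simp
  | case2 x xs => simp
  | case3 xs x ys ih =>
    rw [List.count_cons, List.count_cons, List.count_cons,
      ih (List.Pairwise.of_cons h₁) (List.Pairwise.of_cons h₂)]
    by_cases hc : x = c <;> simp [hc]
  | case4 x xs y ys hxy hlt ih =>
    rw [ih (List.Pairwise.of_cons h₁) h₂]
    by_cases hc : c = x
    · subst hc
      have h0 : (y :: ys).count c = 0 := count_eq_zero_of_desc_lt h₂ hlt
      rw [h0]
      simp
    · rw [List.count_cons_of_ne (fun h => hc h.symm)]
  | case5 x xs y ys hxy hlt ih =>
    rw [ih h₁ (List.Pairwise.of_cons h₂)]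
    by_cases hc : c = y
    · subst hc
      have hyx : x < c := lt_of_le_of_ne (not_lt.mp hlt) (fun h => hxy h)
      have h0 : (x :: xs).count c = 0 := count_eq_zero_of_desc_lt h₁ hyx
      rw [h0]
      simp
    · rw [List.count_cons_of_ne (fun h => hc h.symm)]

theorem mergeInter_mem (l₁ l₂ : List Char) :
    ∀ z ∈ mergeInter l₁ l₂, z ∈ l₁ ∧ z ∈ l₂ := by
  fun_induction mergeInter l₁ l₂ with
  | case1 l => simp
  | case2 x xs => simp
  | case3 xs x ys ih =>
    intro z hz
    rcases List.mem_cons.mp hz with rfl | hz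
    · exact ⟨List.mem_cons_self, List.mem_cons_self⟩
    · rcases ih z hz with ⟨h1, h2⟩
      exact ⟨List.mem_cons_of_mem _ h1, List.mem_cons_of_mem _ h2⟩
  | case4 x xs y ys hxy hlt ih =>
    intro z hz
    rcases ih z hz with ⟨h1, h2⟩
    exact ⟨List.mem_cons_of_mem _ h1, h2⟩
  | case5 x xs y ys hxy hlt ih =>
    intro z hz
    rcases ih z hz with ⟨h1, h2⟩
    exact ⟨h1, List.mem_cons_of_mem _ h2⟩

theorem mergeInter_desc (l₁ l₂ : List Char) (h₁ : Desc l₁) (h₂ : Desc l₂) :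
    Desc (mergeInter l₁ l₂) := by
  fun_induction mergeInter l₁ l₂ with
  | case1 l => exact List.Pairwise.nil
  | case2 x xs => exact List.Pairwise.nil
  | case3 xs x ys ih =>
    refine List.pairwise_cons.mpr ⟨?_, ih (List.Pairwise.of_cons h₁) (List.Pairwise.of_cons h₂)⟩
    intro z hz
    exact (List.pairwise_cons.mp h₁).1 z (mergeInter_mem _ _ z hz).1
  | case4 x xs y ys hxy hlt ih => exact ih (List.Pairwise.of_cons h₁) h₂
  | case5 x xs y ys hxy hlt ih => exact ih h₁ (List.Pairwise.of_cons h₂)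

theorem perm_helper (l : List Char) (n : Char → Nat) (g : Char → List Char)
    (h : ∀ c ∈ l, c :: g c = List.replicate (n c) c) :
    (l ++ l.flatMap g).Perm (l.flatMap (fun c => List.replicate (n c) c)) := by
  induction l with
  | nil => simp
  | cons x l ih =>
    simp only [List.flatMap_cons, List.cons_append]
    rw [← h x (by simp)]
    refine List.Perm.cons x ?_
    have h1 : (l ++ (g x ++ l.flatMap g)) = (l ++ g x) ++ l.flatMap g := by simp
    rw [h1]
    refine List.Perm.trans (List.Perm.append_right _ List.perm_append_comm) ?_
    have h2 : (g x ++ l) ++ l.flatMap g = g x ++ (l ++ l.flatMap g) := by simp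
    rw [h2]
    exact List.Perm.append_left _ (ih (fun c hc => h c (by simp [hc])))

theorem count_flatMap_replicate (I : List Char) (n : Char → Nat) (hnd : I.Nodup) (c : Char) :
    (I.flatMap (fun d => List.replicate (n d) d)).count c = if c ∈ I then n c else 0 := by
  induction I with
  | nil => simp
  | cons x I ih =>
    rcases List.nodup_cons.mp hnd with ⟨hx, hnd'⟩
    rw [List.flatMap_cons, List.count_append, ih hnd', List.count_replicate]
    by_cases hc : c = x
    · subst hc
      simp [hx]
    · simp [hc, Ne.symm hc]

-- the characterisation of A's pre-sort multiset (shared foldl reshaping)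
theorem resA_perm (lX lY I : List Char)
    (hmem : ∀ c ∈ I, c ∈ lX ∧ c ∈ lY) :
    ((PySem.List.pyRange 0 (PySem.List.len I) 1).foldl (fun res i =>
      let c := PySem.List.pyGetD I i ' '
      let cntX := PySem.List.count lX c
      let cntY := PySem.List.count lY c
      if cntX ≠ cntY ∨ (cntX > 1 ∧ cntY > 1) then
        res ++ List.replicate (min cntX cntY - 1) c
      else res) I).Perm
    (I.flatMap (fun c => List.replicate (min (lX.count c) (lY.count c)) c)) := by
  rw [PySem.List.foldl_pyRange_zero_pyGetD I ' '
    (fun res c =>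
      if PySem.List.count lX c ≠ PySem.List.count lY c ∨ (PySem.List.count lX c > 1 ∧ PySem.List.count lY c > 1) then
        res ++ List.replicate (min (PySem.List.count lX c) (PySem.List.count lY c) - 1) c
      else res) I]
  rw [PySem.List.foldl_congr_mem I _
    (fun res c => res ++
      (if PySem.List.count lX c ≠ PySem.List.count lY c ∨ (PySem.List.count lX c > 1 ∧ PySem.List.count lY c > 1) then
        List.replicate (min (PySem.List.count lX c) (PySem.List.count lY c) - 1) c
      else [])) I
    (by
      intro acc c _
      beta_reduce
      by_cases hp : PySem.List.count lX c ≠ PySem.List.count lY c ∨ (PySem.List.count lX c > 1 ∧ PySem.List.count lY c > 1)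
      · rw [if_pos hp, if_pos hp]
      · rw [if_neg hp, if_neg hp, List.append_nil])]
  rw [PySem.List.foldl_append_eq_flatMap]
  refine perm_helper I _ _ ?_
  intro c hc
  simp only [← PySem.List.count_eq]
  rcases hmem c hc with ⟨hcx, hcy⟩
  have hx : 0 < PySem.List.count lX c := List.count_pos_iff.mpr hcx
  have hy : 0 < PySem.List.count lY c := List.count_pos_iff.mpr hcy
  by_cases hp : ¬ PySem.List.count lX c = PySem.List.count lY c ∨ (PySem.List.count lX c > 1 ∧ PySem.List.count lY c > 1)
  · rw [if_pos hp]
    conv_rhs => rw [show min (PySem.List.count lX c) (PySem.List.count lY c) =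
      (min (PySem.List.count lX c) (PySem.List.count lY c) - 1) + 1 from by omega]
    rw [List.replicate_succ]
  · rw [if_neg hp]
    push Not at hp
    have : min (PySem.List.count lX c) (PySem.List.count lY c) = 1 := by omega
    rw [this, List.replicate_one]

theorem eq_singleton_of_all_eq (l : List Char) (v : Char) (hnd : l.Nodup)
    (hne : l ≠ []) (hall : ∀ d ∈ l, d = v) : l = [v] := by
  cases l with
  | nil => exact absurd rfl hne
  | cons d t =>
    have hd : d = v := hall d List.mem_cons_self
    have ht : t = [] := by
      cases htc : t with
      | nil => rfl
      | cons e u =>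
        exfalso
        have he : e = v := hall e (by rw [htc]; simp)
        rcases List.nodup_cons.mp hnd with ⟨hdn, _⟩
        exact hdn (by rw [htc, hd, ← he]; simp)
    rw [hd, ht]

theorem solution_main (X Y : String) : solution X Y = solution_alt X Y := by
  simp only [solution, solution_alt]
  generalize hX : X.toList = lX
  generalize hY : Y.toList = lY
  have hnd : (PySem.Set.inter (PySem.Set.ofList lX) (PySem.Set.ofList lY)).Nodup :=
    PySem.Set.nodup_inter _ _ (PySem.Set.nodup_ofList _)
  have hmem : ∀ c, c ∈ PySem.Set.inter (PySem.Set.ofList lX) (PySem.Set.ofList lY) ↔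
      (c ∈ lX ∧ c ∈ lY) := by
    intro c
    rw [PySem.Set.mem_inter, PySem.Set.mem_ofList, PySem.Set.mem_ofList]
  generalize hI : PySem.Set.inter (PySem.Set.ofList lX) (PySem.Set.ofList lY) = I at hnd hmem ⊢
  clear hX hY hI
  -- counts of B's merged list
  have hdx : Desc (PySem.List.sorted lX (fun c => c) true) :=
    PySem.List.sorted_pairwise_rev lX (fun c => c)
  have hdy : Desc (PySem.List.sorted lY (fun c => c) true) :=
    PySem.List.sorted_pairwise_rev lY (fun c => c)
  set L := mergeInter (PySem.List.sorted lX (fun c => c) true)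
    (PySem.List.sorted lY (fun c => c) true) with hL
  have hLc : ∀ c, L.count c = min (lX.count c) (lY.count c) := by
    intro c
    rw [hL, mergeInter_count _ _ hdx hdy,
      (PySem.List.sorted_perm lX (fun c => c) true).count_eq,
      (PySem.List.sorted_perm lY (fun c => c) true).count_eq]
  -- the two emptiness conditions agree
  have hE : I = [] ↔ L = [] := by
    constructor
    · intro h
      subst h
      cases hLnil : L with
      | nil => rfl
      | cons z t =>
        exfalso
        have : 0 < L.count z := by rw [hLnil]; simp
        rw [hLc z] at this
        have hzx : z ∈ lX := List.count_pos_iff.mp (by omega)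
        have hzy : z ∈ lY := List.count_pos_iff.mp (by omega)
        exact absurd ((hmem z).mpr ⟨hzx, hzy⟩) (List.not_mem_nil)
    · intro h
      cases hInil : I with
      | nil => rfl
      | cons d t =>
        exfalso
        have hd : d ∈ I := by rw [hInil]; exact List.mem_cons_self
        rcases (hmem d).mp hd with ⟨hdx', hdy'⟩
        have : 0 < L.count d := by
          rw [hLc d]
          exact lt_min (List.count_pos_iff.mpr hdx') (List.count_pos_iff.mpr hdy')
        rw [h] at this
        simp at this
    -- membership in L matches common membership
  have hmemL : ∀ z, z ∈ L ↔ (z ∈ lX ∧ z ∈ lY) := by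
    intro z
    rw [← List.count_pos_iff, hLc z]
    constructor
    · intro h
      exact ⟨List.count_pos_iff.mp (by omega), List.count_pos_iff.mp (by omega)⟩
    · intro ⟨h1, h2⟩
      exact lt_min (List.count_pos_iff.mpr h1) (List.count_pos_iff.mpr h2)
  by_cases hnil : I = []
  · rw [if_pos (by rw [PySem.List.len_eq, hnil]; rfl), if_pos (hE.mp hnil)]
  · rw [if_neg (by rw [PySem.List.len_eq]; simpa using fun h => hnil (List.eq_nil_of_length_eq_zero h)),
      if_neg (fun h => hnil (hE.mpr h))]
    have hZ : I = ['0'] ↔ (L.all (fun c => c == '0') = true) := by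
      rw [List.all_eq_true]
      constructor
      · intro h z hz
        have : z ∈ I := (hmem z).mpr ((hmemL z).mp hz)
        rw [h] at this
        simpa using List.mem_singleton.mp this
      · intro h
        refine eq_singleton_of_all_eq I '0' hnd hnil ?_
        intro d hd
        have hdL : d ∈ L := (hmemL d).mpr ((hmem d).mp hd)
        simpa using h d hdL
    by_cases h0 : I = ['0']
    · rw [if_pos h0, if_pos (hZ.mp h0)]
    · rw [if_neg h0, if_neg (fun h => h0 (hZ.mpr h))]
      refine congrArg String.ofList ?_
      -- both lists are descending with the same counts, hence equal
      have hperm : (PySem.List.sorted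
          ((PySem.List.pyRange 0 (PySem.List.len I) 1).foldl (fun res i =>
            let c := PySem.List.pyGetD I i ' '
            let cntX := PySem.List.count lX c
            let cntY := PySem.List.count lY c
            if cntX ≠ cntY ∨ (cntX > 1 ∧ cntY > 1) then
              res ++ List.replicate (min cntX cntY - 1) c
            else res) I) (fun x => x) true).Perm L := by
        rw [List.perm_iff_count]
        intro c
        rw [(PySem.List.sorted_perm _ (fun x => x) true).count_eq,
          (resA_perm lX lY I (fun c hc => (hmem c).mp hc)).count_eq,
          count_flatMap_replicate I _ hnd c, hLc c]
        by_cases hc : c ∈ I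
        · rw [if_pos hc]
        · rw [if_neg hc]
          have : ¬ (c ∈ lX ∧ c ∈ lY) := fun h => hc ((hmem c).mpr h)
          rcases not_and_or.mp this with h | h
          · rw [List.count_eq_zero.mpr h]; omega
          · rw [List.count_eq_zero.mpr h]; omega
      refine PySem.List.eq_of_perm_of_pairwise_le_of_injective keyC keyC_inj hperm ?_ ?_
      · refine List.Pairwise.imp ?_ (PySem.List.sorted_pairwise_rev _ (fun c => c))
        intro a b h
        exact keyC_anti a b h
      · refine List.Pairwise.imp ?_ (mergeInter_desc _ _ hdx hdy)
        intro a b h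
        exact keyC_anti a b h

-- ===== VERDICT (by name: the statement is the Claim_ definition above) =====
theorem solution_spec : Claim_equal_solution := by
  intro X Y _
  show _ = _
  exact solution_main X Y
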